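-- pv_equiv track=rewrite | github.com/nina-gitty/gmc_auto | ts_gmc_tools/regionmismatch/region_mismatch.py | parse_product_blob
-- ===== SOURCE A (Python) =====
-- from typing import Optional, Dict, Tuple, List
--
-- def parse_product_blob(blob: str) -> Tuple[Optional[str], Optional[str]]:
--     if not blob: return None, None
--     lines = [l.strip() for l in blob.splitlines() if l.strip()]
--     url = None
--     product_id = None
--     for i, line in enumerate(lines):
--         if line.lower() == "product page on your website":
--             if i + 1 < len(lines):
--                 cand = lines[i + 1].strip()
--                 if cand.startswith("http"): url = cand
--         if line.lower() == "product id":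
--             if i + 1 < len(lines): product_id = lines[i + 1].strip()
--     if not url:
--         for line in lines:
--             if line.startswith("http"):
--                 url = line
--                 break
--     return product_id, url
-- ===== SOURCE B (Python) =====
-- def parse_product_blob(blob):
--     lines = [l.strip() for l in blob.splitlines() if l.strip()]
--     pairs = list(zip(lines, lines[1:]))
--     product_id = next((nxt for ln, nxt in reversed(pairs) if ln.lower() == "product id"), None)
--     url = next((nxt for ln, nxt in reversed(pairs)
--                 if ln.lower() == "product page on your website" and nxt.startswith("http")), None)
--     if url is None:
--         url = next((l for l in lines if l.startswith("http")), None)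
--     return product_id, url
-- ===== Notes on version B (the rewrite author's own statement) =====
-- stated objective: alternative
-- what changed: Replaces A's forward indexed loop that mutates url/product_id (last write wins) with a reverse first-match search over the list of adjacent (line, next-line) pairs built by zip, keeping the same http guard and first-http fallback.
import Mathlib
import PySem

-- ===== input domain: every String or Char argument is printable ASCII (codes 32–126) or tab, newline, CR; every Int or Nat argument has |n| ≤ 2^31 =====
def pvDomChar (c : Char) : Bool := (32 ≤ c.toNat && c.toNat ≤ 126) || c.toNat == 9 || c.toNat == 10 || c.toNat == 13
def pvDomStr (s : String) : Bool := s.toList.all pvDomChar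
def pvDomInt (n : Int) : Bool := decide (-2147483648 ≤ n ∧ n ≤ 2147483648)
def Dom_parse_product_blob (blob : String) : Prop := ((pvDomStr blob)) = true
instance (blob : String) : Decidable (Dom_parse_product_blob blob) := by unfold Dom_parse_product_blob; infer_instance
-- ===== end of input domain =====

-- B replaces A's index-mutating forward loop by a reverse search over adjacent line pairs (alternative decomposition, same cost).

-- ===== PORT A =====
def parse_product_blob (blob : String) : Option String × Option String :=
  if blob = "" then (none, none)
  else
    let lines := ((PySem.Str.splitlines blob).filter
        (fun l => PySem.Str.strip l ≠ "")).map PySem.Str.strip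
    let st := (PySem.List.enumerate lines 0).foldl
      (fun (st : Option String × Option String) p =>
        let url := if PySem.Str.lower p.2 = "product page on your website" then
            if p.1 + 1 < (lines.length : Int) then
              let cand := PySem.Str.strip (PySem.List.pyGetD lines (p.1 + 1) "")
              if PySem.Str.startswith cand "http" then some cand else st.1
            else st.1
          else st.1
        let pid := if PySem.Str.lower p.2 = "product id" then
            if p.1 + 1 < (lines.length : Int) then
              some (PySem.Str.strip (PySem.List.pyGetD lines (p.1 + 1) ""))
            else st.2
          else st.2
        (url, pid)) (none, none)
    let url := if st.1 = none ∨ st.1 = some "" then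
        match lines.find? (fun l => PySem.Str.startswith l "http") with
        | some l => some l
        | none => st.1
      else st.1
    (st.2, url)

-- ===== PORT B =====
def parse_product_blob_alt (blob : String) : Option String × Option String :=
  let lines := ((PySem.Str.splitlines blob).filter
      (fun l => PySem.Str.strip l ≠ "")).map PySem.Str.strip
  let pairs := lines.zip (PySem.List.slice lines (some 1) none)
  let product_id := (pairs.reverse.find?
      (fun q => PySem.Str.lower q.1 = "product id")).map (fun q => q.2)
  let url0 := (pairs.reverse.find? (fun q =>
      PySem.Str.lower q.1 = "product page on your website" ∧
        PySem.Str.startswith q.2 "http" = true)).map (fun q => q.2)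
  let url := match url0 with
    | some u => some u
    | none => lines.find? (fun l => PySem.Str.startswith l "http")
  (product_id, url)

-- ===== PRECONDITION & SPEC =====
def Spec_parse_product_blob (blob : String) (out : Option String × Option String) : Prop := out = parse_product_blob_alt blob
instance (blob : String) (out : Option String × Option String) : Decidable (Spec_parse_product_blob blob out) := by unfold Spec_parse_product_blob; infer_instance

-- ===== CLAIM (what is proved, stated in full; the proofs are below) =====
def Claim_equal_parse_product_blob : Prop := ∀ (blob : String), Dom_parse_product_blob blob → Spec_parse_product_blob blob (parse_product_blob blob)

-- ===== LEMMAS AND PROOFS =====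

-- strip is idempotent
theorem pv_dropWhile_idem {α : Type} (p : α → Bool) (l : List α) :
    List.dropWhile p (List.dropWhile p l) = List.dropWhile p l := by
  cases h : List.dropWhile p l with
  | nil => simp
  | cons x xs =>
    have hx : p x = false := by
      have := List.head_dropWhile_not p (l := l) (by simp [h])
      simpa [h] using this
    simp [List.dropWhile_cons, hx]

theorem pv_strip_idem (s : List Char) :
    PySem.Chars.strip (PySem.Chars.strip s) = PySem.Chars.strip s := by
  unfold PySem.Chars.strip PySem.Chars.rstrip PySem.Chars.lstrip
  set p := PySem.Chars.isspace
  set w := List.dropWhile p s with hw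
  -- rstrip w, a prefix of w, still has a head failing p (or is empty)
  have hlstr : ∀ t : List Char, List.dropWhile p t = t →
      List.dropWhile p (List.dropWhile p t.reverse).reverse
        = (List.dropWhile p t.reverse).reverse := by
    intro t ht
    have hpref : (List.dropWhile p t.reverse).reverse <+: t := by
      have := List.dropWhile_suffix (l := t.reverse) p
      have := List.IsSuffix.reverse this
      simpa using this
    obtain ⟨u, hu⟩ := hpref
    cases hr : (List.dropWhile p t.reverse).reverse with
    | nil => simp
    | cons x xs =>
      have hx : p x = false := by
        rw [hr] at hu
        have hxh : t.head? = some x := by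
          rw [← hu]; simp
        cases t with
        | nil => simp at hxh
        | cons y ys =>
          have hy : y = x := by simpa using hxh
          subst hy
          cases hpe : p y with
          | false => rfl
          | true =>
            rw [List.dropWhile_cons, hpe] at ht
            simp at ht
            have hsub : (List.dropWhile p ys).length ≤ ys.length :=
              (List.dropWhile_sublist (l := ys) p).length_le
            rw [ht] at hsub
            simp at hsub
      simp [hx]
  have hw_fix : List.dropWhile p w = w := pv_dropWhile_idem p s
  have h1 := hlstr w hw_fix
  rw [h1, List.reverse_reverse, pv_dropWhile_idem]

theorem pv_str_strip_idem (s : String) :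
    PySem.Str.strip (PySem.Str.strip s) = PySem.Str.strip s := by
  simp [PySem.Str.strip, String.toList_ofList, pv_strip_idem]

-- a fold over a pair of independent components splits into two folds
theorem pv_foldl_pair_split {α β γ : Type} (l : List α)
    (f : β → α → β) (g : γ → α → γ) (b : β) (c : γ) :
    l.foldl (fun st p => (f st.1 p, g st.2 p)) (b, c) = (l.foldl f b, l.foldl g c) := by
  induction l generalizing b c with
  | nil => rfl
  | cons x xs ih => simp [List.foldl_cons, ih]

-- a fold over enumerate that only touches the next line equals a fold over adjacent pairs
theorem pv_foldl_enum_adj {β : Type} (step : β → String → String → β)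
    (L : List String) (suf : List String) (k : Nat) (h : L.drop k = suf) (b : β) :
    (PySem.List.enumerate suf (k : Int)).foldl
      (fun st p => if p.1 + 1 < (L.length : Int)
        then step st p.2 (PySem.List.pyGetD L (p.1 + 1) "") else st) b
    = (suf.zip suf.tail).foldl (fun st q => step st q.1 q.2) b := by
  induction suf generalizing k b with
  | nil => simp [PySem.List.enumerate]
  | cons x xs ih =>
    have hk : k < L.length := by
      have : (L.drop k).length = xs.length + 1 := by rw [h]; simp
      rw [List.length_drop] at this; omega
    have hdrop : L.drop (k + 1) = xs := by
      rw [← List.tail_drop, h]; rfl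
    rw [PySem.List.enumerate_cons]
    cases xs with
    | nil =>
      have hlen : L.length = k + 1 := by
        have : (L.drop k).length = 1 := by rw [h]; simp
        rw [List.length_drop] at this; omega
      have hguard : ¬ ((k : Int) + 1 < (L.length : Int)) := by
        rw [hlen]; push_cast; omega
      simp [List.foldl_cons, hguard, PySem.List.enumerate]
    | cons y ys =>
      have hguard : (k : Int) + 1 < (L.length : Int) := by
        have : (L.drop k).length = ys.length + 2 := by rw [h]; simp
        rw [List.length_drop] at this
        have : k + 1 < L.length := by omega
        push_cast; omega
      have hget : PySem.List.pyGetD L ((k : Int) + 1) "" = y := by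
        have : ((k : Int) + 1) = ((k + 1 : Nat) : Int) := by push_cast; ring
        rw [this, PySem.List.pyGetD_natCast]
        have : L[k + 1]? = some y := by
          have := List.getElem?_drop (xs := L) (i := k + 1) (j := 0)
          rw [hdrop] at this
          simpa using this.symm
        simp [List.getD, this]
      simp only [List.foldl_cons, hguard, if_pos, hget]
      have := ih (k + 1) hdrop (step b x y)
      push_cast at this ⊢
      rw [this]
      simp [List.zip]

-- last-wins accumulation equals first match of the reversed list
theorem pv_foldl_lastwins {α : Type} (l : List α) (f : α → Bool) (v : α → String)
    (a : Option String) :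
    l.foldl (fun st q => if f q then some (v q) else st) a
      = ((l.reverse.find? f).map (fun q => some (v q))).getD a := by
  induction l generalizing a with
  | nil => rfl
  | cons x xs ih =>
    rw [List.foldl_cons, ih]
    rw [List.reverse_cons, List.find?_append]
    cases hfx : List.find? f xs.reverse with
    | some q => simp
    | none =>
      cases hx : f x <;> simp [List.find?_cons, hx]

-- find? only depends on the predicate's values on members
theorem pv_find?_congr {α : Type} (l : List α) (p q : α → Bool)
    (h : ∀ x ∈ l, p x = q x) : l.find? p = l.find? q := by
  induction l with
  | nil => rfl
  | cons x xs ih =>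
    rw [List.find?_cons, List.find?_cons, h x (by simp)]
    cases q x with
    | true => rfl
    | false => exact ih (fun y hy => h y (by simp [hy]))

-- every element of the stripped-lines list is its own strip
theorem pv_lines_stripped (blob : String) (l : String)
    (hl : l ∈ ((PySem.Str.splitlines blob).filter
        (fun s => PySem.Str.strip s ≠ "")).map PySem.Str.strip) :
    PySem.Str.strip l = l := by
  simp only [List.mem_map] at hl
  obtain ⟨s, _, rfl⟩ := hl
  exact pv_str_strip_idem s

theorem pv_startswith_http_ne_empty (s : String)
    (h : PySem.Str.startswith s "http" = true) : s ≠ "" := by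
  intro he
  subst he
  rw [PySem.Str.startswith_eq] at h
  rw [PySem.Chars.startswith_iff] at h
  simp at h

theorem parse_product_blob_eq (blob : String) :
    parse_product_blob blob = parse_product_blob_alt blob := by
  by_cases hb : blob = ""
  · subst hb; decide
  · unfold parse_product_blob parse_product_blob_alt
    rw [if_neg hb]
    dsimp only
    set lines := ((PySem.Str.splitlines blob).filter
        (fun l => PySem.Str.strip l ≠ "")).map PySem.Str.strip with hlines
    have hmem : ∀ l ∈ lines, PySem.Str.strip l = l := fun l hl =>
      pv_lines_stripped blob l (hlines ▸ hl)
    have hslice : PySem.List.slice lines (some 1) none = lines.tail := by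
      rw [PySem.List.slice_from lines (by norm_num : (0:Int) ≤ 1)]
      simp [List.drop_one]
    rw [hslice]
    set pairs := lines.zip lines.tail with hpairs
    -- pair members are stripped lines
    have hmem2 : ∀ q ∈ pairs, PySem.Str.strip q.2 = q.2 := by
      intro q hq
      exact hmem q.2 (List.mem_of_mem_tail (List.of_mem_zip hq).2)
    -- 1) rewrite A's fold body into guarded component form and split
    have hsplit :
        (PySem.List.enumerate lines 0).foldl
          (fun (st : Option String × Option String) p =>
            let url := if PySem.Str.lower p.2 = "product page on your website" then
                if p.1 + 1 < (lines.length : Int) then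
                  let cand := PySem.Str.strip (PySem.List.pyGetD lines (p.1 + 1) "")
                  if PySem.Str.startswith cand "http" then some cand else st.1
                else st.1
              else st.1
            let pid := if PySem.Str.lower p.2 = "product id" then
                if p.1 + 1 < (lines.length : Int) then
                  some (PySem.Str.strip (PySem.List.pyGetD lines (p.1 + 1) ""))
                else st.2
              else st.2
            (url, pid)) (none, none)
        = ((PySem.List.enumerate lines 0).foldl
            (fun (u : Option String) p => if p.1 + 1 < (lines.length : Int)
              then (fun u line nxt =>
                if PySem.Str.lower line = "product page on your website" then
                  (if PySem.Str.startswith (PySem.Str.strip nxt) "http"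
                    then some (PySem.Str.strip nxt) else u)
                else u) u p.2 (PySem.List.pyGetD lines (p.1 + 1) "") else u) none,
           (PySem.List.enumerate lines 0).foldl
            (fun (u : Option String) p => if p.1 + 1 < (lines.length : Int)
              then (fun u line nxt =>
                if PySem.Str.lower line = "product id"
                  then some (PySem.Str.strip nxt) else u) u p.2
                (PySem.List.pyGetD lines (p.1 + 1) "") else u) none) := by
      rw [← pv_foldl_pair_split]
      apply PySem.List.foldl_congr_mem
      intro st p _
      dsimp only
      congr 1 <;> [skip; skip]
      · by_cases h1 : PySem.Str.lower p.2 = "product page on your website" <;>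
          by_cases h2 : p.1 + 1 < (lines.length : Int) <;> simp [h1, h2]
      · by_cases h1 : PySem.Str.lower p.2 = "product id" <;>
          by_cases h2 : p.1 + 1 < (lines.length : Int) <;> simp [h1, h2]
    rw [hsplit]
    -- 2) enumerate-fold → pairs-fold, for each component
    have hA := pv_foldl_enum_adj (fun u line nxt =>
        if PySem.Str.lower line = "product page on your website" then
          (if PySem.Str.startswith (PySem.Str.strip nxt) "http"
            then some (PySem.Str.strip nxt) else u)
        else u) lines lines 0 (by simp) none
    have hP := pv_foldl_enum_adj (fun u line nxt =>
        if PySem.Str.lower line = "product id"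
          then some (PySem.Str.strip nxt) else u) lines lines 0 (by simp) none
    simp only [Nat.cast_zero] at hA hP
    rw [hA, hP]
    -- 3) last-wins → reverse find?
    have hurl :
        pairs.foldl (fun u q =>
            if PySem.Str.lower q.1 = "product page on your website" then
              (if PySem.Str.startswith (PySem.Str.strip q.2) "http"
                then some (PySem.Str.strip q.2) else u)
            else u) none
        = (pairs.reverse.find? (fun q =>
            PySem.Str.lower q.1 = "product page on your website" ∧
              PySem.Str.startswith q.2 "http" = true)).map (fun q => q.2) := by
      have h1 : pairs.foldl (fun u q =>
            if PySem.Str.lower q.1 = "product page on your website" then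
              (if PySem.Str.startswith (PySem.Str.strip q.2) "http"
                then some (PySem.Str.strip q.2) else u)
            else u) none
          = pairs.foldl (fun u q =>
              if (decide (PySem.Str.lower q.1 = "product page on your website") &&
                  PySem.Str.startswith q.2 "http") then some (PySem.Str.strip q.2)
              else u) none := by
        apply PySem.List.foldl_congr_mem
        intro u q hq
        rw [hmem2 q hq]
        by_cases h1 : PySem.Str.lower q.1 = "product page on your website" <;>
          cases h2 : PySem.Str.startswith q.2 "http" <;>
            simp at h2 <;> simp [h1, h2]
      rw [h1, pv_foldl_lastwins]
      rw [pv_find?_congr pairs.reverse _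
        (fun q => decide (PySem.Str.lower q.1 = "product page on your website" ∧
          PySem.Str.startswith q.2 "http" = true))
        (by intro q hq
            by_cases h1 : PySem.Str.lower q.1 = "product page on your website" <;>
              cases h2 : PySem.Str.startswith q.2 "http" <;>
                simp at h2 <;> simp [h1, h2])]
      cases hf : pairs.reverse.find? (fun q =>
          decide (PySem.Str.lower q.1 = "product page on your website" ∧
            PySem.Str.startswith q.2 "http" = true)) with
      | none => simp
      | some q =>
        have hqm : q ∈ pairs := by
          have := List.mem_of_find?_eq_some hf
          simpa using this
        simp [hmem2 q hqm]
    have hpid :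
        pairs.foldl (fun u q =>
            if PySem.Str.lower q.1 = "product id"
              then some (PySem.Str.strip q.2) else u) none
        = (pairs.reverse.find? (fun q =>
            PySem.Str.lower q.1 = "product id")).map (fun q => q.2) := by
      have h1 : pairs.foldl (fun u q =>
            if PySem.Str.lower q.1 = "product id"
              then some (PySem.Str.strip q.2) else u) none
          = pairs.foldl (fun u q =>
              if decide (PySem.Str.lower q.1 = "product id")
                then some (PySem.Str.strip q.2) else u) none := by
        apply PySem.List.foldl_congr_mem
        intro u q _
        by_cases h1 : PySem.Str.lower q.1 = "product id" <;> simp [h1]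
      rw [h1, pv_foldl_lastwins]
      cases hf : pairs.reverse.find? (fun q => decide (PySem.Str.lower q.1 = "product id")) with
      | none => simp
      | some q =>
        have hqm : q ∈ pairs := by
          have := List.mem_of_find?_eq_some hf
          simpa using this
        simp [hmem2 q hqm]
    rw [hurl, hpid]
    -- 4) final url assembly
    dsimp only
    congr 1
    cases hf : (pairs.reverse.find? (fun q =>
        PySem.Str.lower q.1 = "product page on your website" ∧
          PySem.Str.startswith q.2 "http" = true)) with
    | none =>
      simp only [hf, Option.map_none, true_or, if_true]
      cases lines.find? (fun l => PySem.Str.startswith l "http") <;> rfl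
    | some q =>
      have hhttp : PySem.Str.startswith q.2 "http" = true := by
        have := List.find?_eq_some_iff_append.mp hf
        have hq := this.1
        simp only [decide_eq_true_eq] at hq
        exact hq.2
      have hne : (some q.2 : Option String) ≠ some "" := by
        simpa using pv_startswith_http_ne_empty q.2 hhttp
      simp only [hf, Option.map_some]
      rw [if_neg]
      simp only [not_or]
      exact ⟨by simp, hne⟩

-- ===== VERDICT (by name: the statement is the Claim_ definition above) =====
theorem parse_product_blob_spec : Claim_equal_parse_product_blob := by
  intro blob _
  unfold Spec_parse_product_blob
  exact parse_product_blob_eq blob
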